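-- pv_equiv track=rewrite | github.com/cla7aye15I4nd/TypePython | tests/fixtures/valid/advanced/control_flow_complex/nested_loops.py | multiplication_table
-- ===== SOURCE A (Python) =====
-- def multiplication_table(n: int) -> int:
--     sum: int = 0
--     i: int = 1
--     while i <= n:
--         j: int = 1
--         while j <= n:
--             sum = sum + (i * j)
--             j = j + 1
--         i = i + 1
--     return sum
-- ===== SOURCE B (Python) =====
-- def multiplication_table(n: int) -> int:
--     if n <= 0:
--         return 0
--     t = n * (n + 1) // 2
--     return t * t
-- ===== Notes on version B (the rewrite author's own statement) =====
-- stated objective: faster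
-- what changed: Replaced the nested O(n^2) double loop with the closed form (n(n+1)/2)^2 since the table sum factors as (sum i)(sum j).
import Mathlib
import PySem

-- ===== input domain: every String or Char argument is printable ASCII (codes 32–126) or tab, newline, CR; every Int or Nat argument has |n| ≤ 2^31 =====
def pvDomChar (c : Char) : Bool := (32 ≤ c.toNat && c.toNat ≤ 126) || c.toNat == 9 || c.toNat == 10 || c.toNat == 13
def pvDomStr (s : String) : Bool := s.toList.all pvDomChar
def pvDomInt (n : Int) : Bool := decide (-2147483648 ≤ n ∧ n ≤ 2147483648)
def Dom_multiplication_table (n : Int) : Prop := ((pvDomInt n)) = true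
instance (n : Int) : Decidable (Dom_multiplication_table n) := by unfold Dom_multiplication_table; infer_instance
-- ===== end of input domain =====

-- B replaces A's O(n^2) nested loops with the closed form (n(n+1)/2)^2 (objective: faster, asymptotic).

-- ===== PORT A =====
-- inner 'while j <= n' loop of A, on the same state (sum)
def mtInner (n i j sum : Int) : Int :=
  if j ≤ n then mtInner n i (j + 1) (sum + i * j) else sum
termination_by (n + 1 - j).toNat
decreasing_by omega

-- outer 'while i <= n' loop of A
def mtOuter (n i sum : Int) : Int :=
  if i ≤ n then mtOuter n (i + 1) (mtInner n i 1 sum) else sum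
termination_by (n + 1 - i).toNat
decreasing_by omega

def multiplication_table (n : Int) : Int := mtOuter n 1 0

-- ===== PORT B =====
def multiplication_table_alt (n : Int) : Int :=
  if n ≤ 0 then 0
  else
    let t := PySem.Int.floordiv (n * (n + 1)) 2
    t * t

-- ===== PRECONDITION & SPEC =====
def Spec_multiplication_table (n : Int) (out : Int) : Prop := out = multiplication_table_alt n
instance (n : Int) (out : Int) : Decidable (Spec_multiplication_table n out) := by unfold Spec_multiplication_table; infer_instance

-- ===== CLAIM (what is proved, stated in full; the proofs are below) =====
def Claim_equal_multiplication_table : Prop := ∀ (n : Int), Dom_multiplication_table n → Spec_multiplication_table n (multiplication_table n)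

-- ===== LEMMAS AND PROOFS =====

-- G n j = j + (j+1) + … + n (0 if j > n), the sum A's inner loop accumulates
def mtG (n j : Int) : Int :=
  if j ≤ n then j + mtG n (j + 1) else 0
termination_by (n + 1 - j).toNat
decreasing_by omega

theorem mtInner_eq (n i : Int) : ∀ j sum : Int, mtInner n i j sum = sum + i * mtG n j := by
  intro j
  induction j using mtG.induct n with
  | case1 j h ih =>
      intro s
      rw [mtInner, mtG, if_pos h, if_pos h, ih]; ring
  | case2 j h =>
      intro s
      rw [mtInner, mtG, if_neg h, if_neg h]; ring

theorem mtOuter_eq (n : Int) : ∀ i sum : Int, mtOuter n i sum = sum + mtG n i * mtG n 1 := by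
  intro i
  induction i using mtG.induct n with
  | case1 i h ih =>
      intro s
      rw [mtOuter, if_pos h, ih, mtInner_eq]
      conv_rhs => rw [mtG, if_pos h]
      ring
  | case2 i h =>
      intro s
      rw [mtOuter, if_neg h, mtG, if_neg h]; ring

theorem mtG_two_mul (n : Int) : ∀ j : Int, 2 * mtG n j = if j ≤ n then n * (n + 1) - (j - 1) * j else 0 := by
  intro j
  induction j using mtG.induct n with
  | case1 j h ih =>
      rw [mtG, if_pos h, if_pos h]
      by_cases h2 : j + 1 ≤ n
      · rw [if_pos h2] at ih; nlinarith [ih]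
      · rw [if_neg h2] at ih
        have hj : j = n := by omega
        subst hj; nlinarith [ih]
  | case2 j h =>
      rw [mtG, if_neg h, if_neg h]; ring

-- ===== VERDICT (by name: the statement is the Claim_ definition above) =====
theorem multiplication_table_spec : Claim_equal_multiplication_table := by
  intro n _
  unfold Spec_multiplication_table multiplication_table multiplication_table_alt
  rw [mtOuter_eq]
  by_cases h : n ≤ 0
  · rw [if_pos h]
    have := mtG_two_mul n 1
    rw [if_neg (by omega)] at this
    have h0 : mtG n 1 = 0 := by omega
    rw [h0]; ring
  · rw [if_neg h]
    have h2 := mtG_two_mul n 1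
    rw [if_pos (by omega)] at h2
    have hf : PySem.Int.floordiv (n * (n + 1)) 2 = mtG n 1 := by
      rw [PySem.Int.floordiv_eq_ediv_of_pos (by omega)]
      omega
    rw [hf]; ring
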